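-- pv_equiv track=rewrite | github.com/yogiswim/XCS224N-A1 | co_occurrence.py | distinct_words
-- ===== SOURCE A (Python) =====
-- def distinct_words(corpus):
--     """ Determine a list of distinct words for the corpus.
--         Params:
--             corpus (list of list of strings): corpus of documents
--         Return:
--             corpus_words (list of strings): list of distinct words across the corpus, sorted (using python 'sorted' function)
--             num_corpus_words (integer): number of distinct words across the corpus
--     """
--     corpus_words = []
--     num_corpus_words = -1
--
-- ### SOLUTION BEGIN
--     distinct_words = set([])
--     for sentence in corpus:
--         for word in sentence:
--             distinct_words.add(word)
--
--     corpus_words = sorted(list(distinct_words))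
--     num_corpus_words = len(corpus_words)
--
-- ### SOLUTION END
--
--     return corpus_words, num_corpus_words
-- ===== SOURCE B (Python) =====
-- def distinct_words(corpus):
--     """ Determine a list of distinct words for the corpus. """
--     words = sorted(w for sentence in corpus for w in sentence)
--     corpus_words = []
--     prev = None
--     for w in words:
--         if w != prev:
--             corpus_words.append(w)
--             prev = w
--     num_corpus_words = len(corpus_words)
--     return corpus_words, num_corpus_words
-- ===== Notes on version B (the rewrite author's own statement) =====
-- stated objective: alternative
-- what changed: B flattens the corpus keeping duplicates, sorts the full multiset once, and dedupes by a single adjacency scan with a 'previous word' sentinel, instead of A's hash-set accumulation followed by sorting the set.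
import Mathlib
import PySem

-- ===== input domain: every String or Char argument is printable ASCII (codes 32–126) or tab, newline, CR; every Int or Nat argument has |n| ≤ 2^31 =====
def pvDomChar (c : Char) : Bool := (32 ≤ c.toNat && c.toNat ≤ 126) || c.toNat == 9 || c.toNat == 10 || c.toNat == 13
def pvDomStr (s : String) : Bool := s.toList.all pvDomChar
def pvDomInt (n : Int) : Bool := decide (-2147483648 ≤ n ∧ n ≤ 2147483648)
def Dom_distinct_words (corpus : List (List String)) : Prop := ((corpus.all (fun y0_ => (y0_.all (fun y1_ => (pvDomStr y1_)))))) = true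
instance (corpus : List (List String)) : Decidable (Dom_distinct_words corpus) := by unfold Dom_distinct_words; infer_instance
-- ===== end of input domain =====

-- B replaces A's hash-set accumulation + sort-of-the-set by one sort of the full
-- flattened word list followed by an adjacency-dedupe scan (objective: alternative).

-- ===== PORT A =====
-- for sentence in corpus: for word in sentence: distinct_words.add(word)
-- corpus_words = sorted(list(distinct_words)); return corpus_words, len(corpus_words)
-- (list(set) is consumed only by a key-less sorted, so the hash order cannot matter)
def distinct_words (corpus : List (List String)) : List String × Int :=
  let distinct : PySem.Set String :=
    corpus.foldl (fun s sentence => sentence.foldl (fun s word => PySem.Set.add s word) s)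
      PySem.Set.empty
  let corpus_words := PySem.List.sorted distinct (fun x => x) false
  (corpus_words, (corpus_words.length : Int))

-- ===== PORT B =====
-- words = sorted(w for sentence in corpus for w in sentence); then one scan keeping
-- each word that differs from the previously kept one (prev starts as None).
def distinct_words_alt (corpus : List (List String)) : List String × Int :=
  let words := PySem.List.sorted (corpus.flatMap (fun sentence => sentence)) (fun x => x) false
  let scan := words.foldl
    (fun (st : List String × Option String) w =>
      if some w ≠ st.2 then (st.1 ++ [w], some w) else st)
    ([], none)
  (scan.1, (scan.1.length : Int))

-- ===== PRECONDITION & SPEC =====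
def Spec_distinct_words (corpus : List (List String)) (out : List String × Int) : Prop := out = distinct_words_alt corpus
instance (corpus : List (List String)) (out : List String × Int) : Decidable (Spec_distinct_words corpus out) := by unfold Spec_distinct_words; infer_instance

-- ===== CLAIM (what is proved, stated in full; the proofs are below) =====
def Claim_equal_distinct_words : Prop := ∀ (corpus : List (List String)), Dom_distinct_words corpus → Spec_distinct_words corpus (distinct_words corpus)

-- ===== LEMMAS AND PROOFS =====

-- dedupeAdj prev ws: what B's adjacency scan emits after having last emitted `prev`
def dedupeAdj (prev : Option String) : List String → List String
  | [] => []
  | w :: ws => if some w ≠ prev then w :: dedupeAdj (some w) ws else dedupeAdj prev ws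

theorem foldl_scan_eq (ws : List String) (out : List String) (prev : Option String) :
    (ws.foldl (fun (st : List String × Option String) w =>
        if some w ≠ st.2 then (st.1 ++ [w], some w) else st) (out, prev)).1
      = out ++ dedupeAdj prev ws := by
  induction ws generalizing out prev with
  | nil => simp [dedupeAdj]
  | cons w ws ih =>
      simp only [List.foldl_cons]
      by_cases h : some w = prev
      · rw [show (if some w ≠ (out, prev).2 then (out ++ [w], some w) else (out, prev))
              = (out, prev) from by simp [h]]
        rw [ih out prev, show dedupeAdj prev (w :: ws) = dedupeAdj prev ws from by
          simp [dedupeAdj, h]]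
      · rw [show (if some w ≠ (out, prev).2 then (out ++ [w], some w) else (out, prev))
              = (out ++ [w], some w) from by simp [h]]
        rw [ih (out ++ [w]) (some w), show dedupeAdj prev (w :: ws)
              = w :: dedupeAdj (some w) ws from by simp [dedupeAdj, h]]
        simp

theorem mem_dedupeAdj (ws : List String) (prev : Option String) (x : String)
    (h1 : ws.Pairwise (· ≤ ·)) (h2 : ∀ p, prev = some p → ∀ y ∈ ws, p ≤ y) :
    x ∈ dedupeAdj prev ws ↔ x ∈ ws ∧ some x ≠ prev := by
  induction ws generalizing prev with
  | nil => simp [dedupeAdj]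
  | cons w ws ih =>
      rcases List.pairwise_cons.mp h1 with ⟨hw, hws⟩
      by_cases h : some w = prev
      · rw [show dedupeAdj prev (w :: ws) = dedupeAdj prev ws from by simp [dedupeAdj, h],
           ih prev hws (fun p hp y hy => h2 p hp y (List.mem_cons_of_mem _ hy))]
        constructor
        · rintro ⟨hx, hne⟩; exact ⟨List.mem_cons_of_mem _ hx, hne⟩
        · rintro ⟨hx, hne⟩
          rcases List.mem_cons.mp hx with rfl | hx
          · exact absurd h hne
          · exact ⟨hx, hne⟩
      · rw [show dedupeAdj prev (w :: ws) = w :: dedupeAdj (some w) ws from by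
             simp [dedupeAdj, h]]
        have ihw := ih (some w) hws
          (fun p hp y hy => by cases Option.some.inj hp; exact hw y hy)
        constructor
        · intro hx
          rcases List.mem_cons.mp hx with rfl | hx
          · exact ⟨List.mem_cons_self, h⟩
          · rcases ihw.mp hx with ⟨hxs, hne⟩
            refine ⟨List.mem_cons_of_mem _ hxs, ?_⟩
            intro heq
            have hxw : x ≤ w := h2 x heq.symm w List.mem_cons_self
            have hwx : w ≤ x := hw x hxs
            exact hne (by rw [le_antisymm hxw hwx])
        · rintro ⟨hx, hne⟩
          rcases List.mem_cons.mp hx with rfl | hx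
          · exact List.mem_cons_self
          · by_cases hxw : x = w
            · subst hxw; exact List.mem_cons_self
            · exact List.mem_cons_of_mem _ (ihw.mpr ⟨hx, by simpa using hxw⟩)

theorem pairwise_dedupeAdj (ws : List String) (prev : Option String)
    (h1 : ws.Pairwise (· ≤ ·)) : (dedupeAdj prev ws).Pairwise (· < ·) := by
  induction ws generalizing prev with
  | nil => simp [dedupeAdj]
  | cons w ws ih =>
      rcases List.pairwise_cons.mp h1 with ⟨hw, hws⟩
      by_cases h : some w = prev
      · rw [show dedupeAdj prev (w :: ws) = dedupeAdj prev ws from by simp [dedupeAdj, h]]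
        exact ih prev hws
      · rw [show dedupeAdj prev (w :: ws) = w :: dedupeAdj (some w) ws from by
             simp [dedupeAdj, h]]
        refine List.pairwise_cons.mpr ⟨?_, ih (some w) hws⟩
        intro y hy
        have hmem := (mem_dedupeAdj ws (some w) y hws
          (fun p hp z hz => by cases Option.some.inj hp; exact hw z hz)).mp hy
        exact lt_of_le_of_ne (hw y hmem.1) (fun e => hmem.2 (congrArg some e.symm))

-- the core fact: deduping the sorted flat list equals sorting the set of its elements
theorem dedupeAdj_sorted_eq (flat : List String) :
    PySem.List.sorted (PySem.Set.ofList flat) (fun x => x) false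
      = dedupeAdj none (PySem.List.sorted flat (fun x => x) false) := by
  set ws := PySem.List.sorted flat (fun x => x) false with hws
  have hpw : ws.Pairwise (· ≤ ·) := PySem.List.sorted_pairwise flat (fun x => x)
  have hmem : ∀ x, x ∈ dedupeAdj none ws ↔ x ∈ PySem.Set.ofList flat := by
    intro x
    rw [mem_dedupeAdj ws none x hpw (by simp), PySem.Set.mem_ofList]
    simp [hws, PySem.List.mem_sorted]
  have hnd : (dedupeAdj none ws).Nodup :=
    (pairwise_dedupeAdj ws none hpw).imp (fun h => ne_of_lt h)
  have hperm : (dedupeAdj none ws).Perm (PySem.Set.ofList flat) :=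
    (List.perm_ext_iff_of_nodup hnd (PySem.Set.nodup_ofList flat)).mpr hmem
  exact PySem.List.sorted_eq_of_perm_of_pairwise_lt _ _ _ hperm
    (pairwise_dedupeAdj ws none hpw)

-- ===== VERDICT (by name: the statement is the Claim_ definition above) =====
theorem distinct_words_spec : Claim_equal_distinct_words := by
  intro corpus _
  unfold Spec_distinct_words distinct_words distinct_words_alt
  simp only [foldl_scan_eq, List.nil_append]
  have hset : corpus.foldl
      (fun s sentence => sentence.foldl (fun s word => PySem.Set.add s word) s)
      PySem.Set.empty = PySem.Set.ofList (corpus.flatMap (fun sentence => sentence)) := by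
    rw [PySem.Set.ofList_eq_foldl]
    rw [show corpus.flatMap (fun sentence => sentence) = corpus.flatten from by simp]
    rw [List.foldl_flatten]
    rfl
  rw [hset, dedupeAdj_sorted_eq]
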